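-- pv_equiv track=rewrite | github.com/michaelmu/investment-research | scripts/paper/performance.py | clean_nav_rows
-- ===== SOURCE A (Python) =====
-- def clean_nav_rows(rows: list[dict]) -> list[dict]:
--     # Keep the last row for each date, preserving input order semantics.
--     by_date: dict[str, dict] = {}
--     order: list[str] = []
--     for r in rows:
--         d = r["date"]
--         if d not in by_date:
--             order.append(d)
--         by_date[d] = r
--     cleaned = [by_date[d] for d in order]
--     cleaned.sort(key=lambda r: r["date"])
--     return cleaned
-- ===== SOURCE B (Python) =====
-- def clean_nav_rows(rows: list[dict]) -> list[dict]:
--     # Stable-sort by date first, then a single adjacent pass: the last row of each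
--     # equal-date run (input order preserved by stability) overwrites the run's slot.
--     out: list[dict] = []
--     for r in sorted(rows, key=lambda r: r["date"]):
--         if out and out[-1]["date"] == r["date"]:
--             out[-1] = r
--         else:
--             out.append(r)
--     return out
-- ===== Notes on version B (the rewrite author's own statement) =====
-- stated objective: alternative
-- what changed: Replaces A's hash-map dedup (dict keyed by date + first-occurrence order list, then sort) by sort-first-then-one-adjacent-pass: stable-sort all rows by date and overwrite the last element of the current equal-date run, maintaining no dict at all.
import Mathlib
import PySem

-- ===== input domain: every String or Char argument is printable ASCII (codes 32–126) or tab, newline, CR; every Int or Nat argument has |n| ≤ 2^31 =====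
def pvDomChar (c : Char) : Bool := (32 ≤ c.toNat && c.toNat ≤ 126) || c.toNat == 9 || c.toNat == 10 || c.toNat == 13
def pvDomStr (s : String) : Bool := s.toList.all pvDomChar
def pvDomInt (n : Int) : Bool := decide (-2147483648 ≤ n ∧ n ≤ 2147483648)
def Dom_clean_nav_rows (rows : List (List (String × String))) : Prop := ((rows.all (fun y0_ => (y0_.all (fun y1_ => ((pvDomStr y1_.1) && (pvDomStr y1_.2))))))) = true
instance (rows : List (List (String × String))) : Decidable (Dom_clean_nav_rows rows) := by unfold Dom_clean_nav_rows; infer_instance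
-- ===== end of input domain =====

-- B replaces A's dict-based dedup-then-sort by a stable sort followed by one adjacent
-- pass overwriting the last element of each equal-date run (alternative decomposition, no dict).


-- ===== PORT A =====
-- r["date"] (a dict lookup; the KeyError case is excluded by Pre_, so the default "" is never used there)
def pvKey (r : List (String × String)) : String := (PySem.Dict.mk r).getD "date" ""

def clean_nav_rows (rows : List (List (String × String))) : List (List (String × String)) :=
  -- by_date : dict[str, dict]; order : list[str]; one pass filling both
  let st := rows.foldl
    (fun (acc : PySem.Dict String (List (String × String)) × List String) r =>
      let d := pvKey r
      let order := if acc.1.contains d then acc.2 else acc.2 ++ [d]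
      (acc.1.insert d r, order))
    (PySem.Dict.empty, [])
  -- cleaned = [by_date[d] for d in order]; cleaned.sort(key=lambda r: r["date"])
  let cleaned := st.2.map (fun d => st.1.getD d [])
  PySem.List.sorted cleaned pvKey false

-- ===== PORT B =====
def clean_nav_rows_alt (rows : List (List (String × String))) : List (List (String × String)) :=
  -- for r in sorted(rows, key=...): overwrite out[-1] on an equal-date run, else append
  (PySem.List.sorted rows pvKey false).foldl
    (fun out r =>
      match out.getLast? with
      | some lastR => if pvKey lastR = pvKey r then out.dropLast ++ [r] else out ++ [r]
      | none => out ++ [r])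
    []

-- ===== PRECONDITION & SPEC =====
-- Pre_ excludes exactly the inputs where a row has no "date" key: there Python A raises KeyError
-- (and Python B raises too, inside its sort key); on every other input A returns normally.
def Pre_clean_nav_rows (rows : List (List (String × String))) : Prop :=
  (rows.all (fun r => (PySem.Dict.mk r).contains "date")) = true
instance (rows : List (List (String × String))) : Decidable (Pre_clean_nav_rows rows) := by unfold Pre_clean_nav_rows; infer_instance
def pvWitness_clean_nav_rows : (List (List (String × String))) :=
  [[("date", "2020-01-02"), ("nav", "1.5")], [("date", "2020-01-01"), ("nav", "1.0")], [("date", "2020-01-02"), ("nav", "1.7")]]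

def Spec_clean_nav_rows (rows : List (List (String × String))) (out : List (List (String × String))) : Prop := out = clean_nav_rows_alt rows
instance (rows : List (List (String × String))) (out : List (List (String × String))) : Decidable (Spec_clean_nav_rows rows out) := by unfold Spec_clean_nav_rows; infer_instance

-- ===== CLAIM (what is proved, stated in full; the proofs are below) =====
def Claim_equal_clean_nav_rows : Prop := ∀ (rows : List (List (String × String))), Dom_clean_nav_rows rows → Pre_clean_nav_rows rows → Spec_clean_nav_rows rows (clean_nav_rows rows)

-- ===== LEMMAS AND PROOFS =====

-- the last row of `rows` whose date is `d` (or [] if none) — how A's dict cell for d ends up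
def pvLastD (rows : List (List (String × String))) (d : String) : List (String × String) :=
  rows.foldl (fun c r => if pvKey r = d then r else c) []

-- run-dedup keeping the last element of each equal-key run (recursive reading of B's loop)
def pvRd : List (List (String × String)) → List (List (String × String))
  | [] => []
  | [a] => [a]
  | a :: b :: l => if pvKey a = pvKey b then pvRd (b :: l) else a :: pvRd (b :: l)

-- the deduped (unsorted) list A builds before sorting
def pvCleanedOf (rows : List (List (String × String))) : List (List (String × String)) :=
  (PySem.List.dedup (rows.map pvKey)).map (fun d => pvLastD rows d)

theorem pvLastD_foldl (t : List (List (String × String))) (d : String) (c : List (String × String)) :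
    t.foldl (fun c r => if pvKey r = d then r else c) c
      = if d ∈ t.map pvKey then pvLastD t d else c := by
  induction t generalizing c with
  | nil => simp
  | cons r t ih =>
    simp only [List.foldl_cons, List.map_cons, List.mem_cons]
    by_cases h : pvKey r = d
    · rw [if_pos h, ih r, if_pos (Or.inl h.symm)]
      show _ = pvLastD (r :: t) d
      unfold pvLastD
      rw [List.foldl_cons, if_pos h, ih r]
      rfl
    · rw [if_neg h, ih c]
      have hd : ¬ d = pvKey r := fun hh => h hh.symm
      by_cases hm : d ∈ t.map pvKey
      · rw [if_pos hm, if_pos (Or.inr hm)]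
        show pvLastD t d = pvLastD (r :: t) d
        unfold pvLastD
        rw [List.foldl_cons, if_neg h, ih ([] : List (String × String)), if_pos hm]
      · rw [if_neg hm, if_neg (by tauto)]

theorem pvLastD_cons (r : List (String × String)) (t : List (List (String × String))) (d : String) :
    pvLastD (r :: t) d = if d ∈ t.map pvKey then pvLastD t d else (if pvKey r = d then r else []) := by
  show t.foldl _ (if pvKey r = d then r else []) = _
  exact pvLastD_foldl t d _

theorem pvLastD_append_singleton (rows : List (List (String × String))) (r : List (String × String)) (d : String) :
    pvLastD (rows ++ [r]) d = if pvKey r = d then r else pvLastD rows d := by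
  unfold pvLastD
  rw [List.foldl_append]
  rfl

theorem pvKey_pvLastD (rows : List (List (String × String))) (d : String) (h : d ∈ rows.map pvKey) :
    pvKey (pvLastD rows d) = d := by
  induction rows with
  | nil => simp at h
  | cons r t ih =>
    rw [pvLastD_cons]
    simp only [List.map_cons, List.mem_cons] at h
    by_cases hm : d ∈ t.map pvKey
    · rw [if_pos hm]; exact ih hm
    · rw [if_neg hm]
      have hr : pvKey r = d := by tauto
      rw [if_pos hr]; exact hr

theorem pvLastD_nil_of_not_mem (s : List (List (String × String))) (d : String)
    (h : d ∉ s.map pvKey) : pvLastD s d = [] := by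
  induction s with
  | nil => rfl
  | cons r t ih =>
    simp only [List.map_cons, List.mem_cons, not_or] at h
    rw [pvLastD_cons, if_neg h.2, if_neg (fun hh => h.1 hh.symm)]

theorem pvLastD_insertBy (s : List (List (String × String))) (r : List (String × String)) (d : String)
    (hs : s.Pairwise (fun a b => pvKey a ≤ pvKey b)) :
    pvLastD (PySem.List.insertBy (fun a b => decide (pvKey a < pvKey b)) r s) d
      = if pvKey r = d then r else pvLastD s d := by
  induction s with
  | nil =>
    simp only [PySem.List.insertBy]
    rw [pvLastD_cons]
    simp [pvLastD]
  | cons y ys ih =>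
    rw [List.pairwise_cons] at hs
    simp only [PySem.List.insertBy]
    by_cases hb : pvKey r < pvKey y
    · rw [if_pos (by simpa using hb)]
      rw [pvLastD_cons]
      by_cases hrd : pvKey r = d
      · have hnot : d ∉ (y :: ys).map pvKey := by
          intro hm
          obtain ⟨z, hz, hzd⟩ := List.mem_map.mp hm
          have hyz : pvKey y ≤ pvKey z := by
            rcases List.mem_cons.mp hz with rfl | hz
            · exact le_refl _
            · exact hs.1 z hz
          rw [hzd, ← hrd] at hyz
          exact absurd (lt_of_lt_of_le hb hyz) (lt_irrefl _)
        rw [if_neg hnot, if_pos hrd, if_pos hrd]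
      · rw [if_neg hrd]
        by_cases hm : d ∈ (y :: ys).map pvKey
        · rw [if_pos hm, if_neg hrd]
        · rw [if_neg hm, if_neg hrd, pvLastD_nil_of_not_mem _ _ hm]
    · rw [if_neg (by simpa using hb)]
      rw [pvLastD_cons]
      have hins := ih hs.2
      have hmm : d ∈ (PySem.List.insertBy (fun a b => decide (pvKey a < pvKey b)) r ys).map pvKey
          ↔ (pvKey r = d ∨ d ∈ ys.map pvKey) := by
        constructor
        · intro hm
          obtain ⟨z, hz, hzd⟩ := List.mem_map.mp hm
          rcases (PySem.List.mem_insertBy _ _ _ _).mp hz with rfl | hz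
          · exact Or.inl hzd
          · exact Or.inr (List.mem_map.mpr ⟨z, hz, hzd⟩)
        · intro hm
          rcases hm with hm | hm
          · exact List.mem_map.mpr ⟨r, (PySem.List.mem_insertBy _ _ _ _).mpr (Or.inl rfl), hm⟩
          · obtain ⟨z, hz, hzd⟩ := List.mem_map.mp hm
            exact List.mem_map.mpr ⟨z, (PySem.List.mem_insertBy _ _ _ _).mpr (Or.inr hz), hzd⟩
      by_cases hrd : pvKey r = d
      · rw [if_pos (hmm.mpr (Or.inl hrd)), hins, if_pos hrd, if_pos hrd]
      · rw [if_neg hrd, pvLastD_cons]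
        by_cases hm : d ∈ ys.map pvKey
        · rw [if_pos (hmm.mpr (Or.inr hm)), hins, if_neg hrd, if_pos hm]
        · by_cases hmi : d ∈ (PySem.List.insertBy (fun a b => decide (pvKey a < pvKey b)) r ys).map pvKey
          · exact absurd (hmm.mp hmi) (by tauto)
          · rw [if_neg hmi, if_neg hm]

theorem pvLastD_sorted (rows : List (List (String × String))) (d : String) :
    pvLastD (PySem.List.sorted rows pvKey false) d = pvLastD rows d := by
  induction rows using List.reverseRecOn with
  | nil => rfl
  | append_singleton rows r ih =>
    have hsort : PySem.List.sorted (rows ++ [r]) pvKey false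
        = PySem.List.insertBy (fun a b => decide (pvKey a < pvKey b)) r (PySem.List.sorted rows pvKey false) := by
      rw [PySem.List.sorted_eq_foldl_insertBy, List.foldl_append, List.foldl_cons, List.foldl_nil,
        ← PySem.List.sorted_eq_foldl_insertBy]
    rw [hsort, pvLastD_insertBy _ _ _ (PySem.List.sorted_pairwise rows pvKey), ih,
      pvLastD_append_singleton]

-- B's loop, recursion-shaped
theorem pvB_shift (s : List (List (String × String))) (ys zs : List (List (String × String))) (hzs : zs ≠ []) :
    s.foldl (fun out r =>
      match out.getLast? with
      | some lastR => if pvKey lastR = pvKey r then out.dropLast ++ [r] else out ++ [r]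
      | none => out ++ [r]) (ys ++ zs)
    = ys ++ s.foldl (fun out r =>
      match out.getLast? with
      | some lastR => if pvKey lastR = pvKey r then out.dropLast ++ [r] else out ++ [r]
      | none => out ++ [r]) zs := by
  induction s generalizing zs with
  | nil => simp
  | cons r s ih =>
    simp only [List.foldl_cons]
    obtain ⟨z, hz⟩ : ∃ z, zs.getLast? = some z := by
      cases hzl : zs.getLast? with
      | none => exact absurd (List.getLast?_eq_none_iff.mp hzl) hzs
      | some z => exact ⟨z, rfl⟩
    rw [List.getLast?_append_of_ne_nil _ hzs, hz]
    by_cases hk : pvKey z = pvKey r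
    · simp only [if_pos hk]
      rw [List.dropLast_append_of_ne_nil hzs, List.append_assoc]
      exact ih (zs.dropLast ++ [r]) (by simp)
    · simp only [if_neg hk]
      rw [List.append_assoc]
      exact ih (zs ++ [r]) (by simp)

theorem pvB_single (s : List (List (String × String))) (x : List (String × String)) :
    s.foldl (fun out r =>
      match out.getLast? with
      | some lastR => if pvKey lastR = pvKey r then out.dropLast ++ [r] else out ++ [r]
      | none => out ++ [r]) [x]
    = pvRd (x :: s) := by
  induction s generalizing x with
  | nil => rfl
  | cons r s ih =>
    simp only [List.foldl_cons]
    by_cases hk : pvKey x = pvKey r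
    · simp only [List.getLast?_singleton, if_pos hk]
      have hd : ([x].dropLast ++ [r] : List (List (String × String))) = [r] := rfl
      rw [hd, ih r]
      show _ = pvRd (x :: r :: s)
      simp [pvRd, hk]
    · simp only [List.getLast?_singleton, if_neg hk]
      rw [pvB_shift s [x] [r] (by simp), ih r]
      show _ = pvRd (x :: r :: s)
      simp [pvRd, hk]

theorem pvB_eq_rd (s : List (List (String × String))) :
    s.foldl (fun out r =>
      match out.getLast? with
      | some lastR => if pvKey lastR = pvKey r then out.dropLast ++ [r] else out ++ [r]
      | none => out ++ [r]) []
    = pvRd s := by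
  cases s with
  | nil => rfl
  | cons x s =>
    simp only [List.foldl_cons]
    exact pvB_single s x

theorem pv_mem_rd {x : List (String × String)} {s : List (List (String × String))} (h : x ∈ pvRd s) : x ∈ s := by
  induction s using pvRd.induct with
  | case1 => simp [pvRd] at h
  | case2 a => simpa [pvRd] using h
  | case3 a b l heq ih =>
    rw [pvRd, if_pos heq] at h
    exact List.mem_cons_of_mem a (ih h)
  | case4 a b l hne ih =>
    rw [pvRd, if_neg hne] at h
    rcases List.mem_cons.mp h with rfl | h
    · exact List.mem_cons_self
    · exact List.mem_cons_of_mem a (ih h)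

theorem pvRd_pairwise (s : List (List (String × String))) (hs : s.Pairwise (fun a b => pvKey a ≤ pvKey b)) :
    (pvRd s).Pairwise (fun a b => pvKey a < pvKey b) := by
  revert hs
  induction s using pvRd.induct with
  | case1 => intro _; simp [pvRd]
  | case2 a => intro _; simp [pvRd]
  | case3 a b l heq ih =>
    intro hs
    rw [pvRd, if_pos heq]
    exact ih (List.pairwise_cons.mp hs).2
  | case4 a b l hne ih =>
    intro hs
    rw [List.pairwise_cons] at hs
    rw [pvRd, if_neg hne]
    refine List.Pairwise.cons ?_ (ih hs.2)
    intro y hy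
    have hab : pvKey a < pvKey b := lt_of_le_of_ne (hs.1 b List.mem_cons_self) hne
    rcases List.mem_cons.mp (pv_mem_rd hy) with rfl | hy'
    · exact hab
    · exact lt_of_lt_of_le hab ((List.pairwise_cons.mp hs.2).1 y hy')

theorem pv_mem_rd_iff (x : List (String × String)) (s : List (List (String × String)))
    (hs : s.Pairwise (fun a b => pvKey a ≤ pvKey b)) :
    x ∈ pvRd s ↔ (pvKey x ∈ s.map pvKey ∧ x = pvLastD s (pvKey x)) := by
  revert hs
  induction s using pvRd.induct with
  | case1 => intro _; simp [pvRd]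
  | case2 a =>
    intro _
    rw [pvRd]
    simp only [List.mem_singleton, List.map_cons, List.map_nil, List.mem_singleton]
    constructor
    · rintro rfl
      refine ⟨rfl, ?_⟩
      rw [pvLastD_cons]
      simp
    · rintro ⟨hk, hx⟩
      rw [pvLastD_cons] at hx
      simp only [List.map_nil, List.not_mem_nil, if_false] at hx
      rw [if_pos hk.symm] at hx
      exact hx
  | case3 a b l heq ih =>
    intro hs
    rw [List.pairwise_cons] at hs
    rw [pvRd, if_pos heq, ih hs.2]
    have hmap : pvKey x ∈ List.map pvKey (a :: b :: l) ↔ pvKey x ∈ List.map pvKey (b :: l) := by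
      constructor
      · intro h
        rcases List.mem_cons.mp h with h | h
        · rw [List.map_cons]
          exact List.mem_cons.mpr (Or.inl (h.trans heq))
        · exact h
      · intro h
        rw [List.map_cons]
        exact List.mem_cons.mpr (Or.inr h)
    constructor
    · rintro ⟨hk, hx⟩
      refine ⟨hmap.mpr hk, ?_⟩
      rw [pvLastD_cons, if_pos hk]
      exact hx
    · rintro ⟨hk, hx⟩
      have hk' := hmap.mp hk
      rw [pvLastD_cons, if_pos hk'] at hx
      exact ⟨hk', hx⟩
  | case4 a b l hne ih =>
    intro hs
    rw [List.pairwise_cons] at hs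
    have hnot : pvKey a ∉ (b :: l).map pvKey := by
      intro hm
      obtain ⟨z, hz, hzd⟩ := List.mem_map.mp hm
      rcases List.mem_cons.mp hz with rfl | hz'
      · exact hne hzd.symm
      · have h1 : pvKey a ≤ pvKey b := hs.1 b List.mem_cons_self
        have h2 : pvKey b ≤ pvKey z := (List.pairwise_cons.mp hs.2).1 z hz'
        exact hne (le_antisymm h1 (hzd ▸ h2))
    rw [pvRd, if_neg hne]
    constructor
    · intro h
      rcases List.mem_cons.mp h with rfl | hx
      · refine ⟨by simp, ?_⟩
        rw [pvLastD_cons, if_neg hnot, if_pos rfl]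
      · obtain ⟨hk, hx'⟩ := (ih hs.2).mp hx
        refine ⟨by rw [List.map_cons]; exact List.mem_cons.mpr (Or.inr hk), ?_⟩
        rw [pvLastD_cons, if_pos hk]
        exact hx'
    · rintro ⟨hk, hx⟩
      have hd : pvKey x = pvKey a ∨ pvKey x ∈ List.map pvKey (b :: l) := by
        rw [List.map_cons] at hk
        exact List.mem_cons.mp hk
      rcases hd with hka | hk'
      · have hnm : pvKey x ∉ List.map pvKey (b :: l) := by rw [hka]; exact hnot
        rw [pvLastD_cons, if_neg hnm, if_pos hka.symm] at hx
        exact List.mem_cons.mpr (Or.inl hx)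
      · rw [pvLastD_cons, if_pos hk'] at hx
        exact List.mem_cons.mpr (Or.inr ((ih hs.2).mpr ⟨hk', hx⟩))

theorem pv_mem_cleanedOf (x : List (String × String)) (rows : List (List (String × String))) :
    x ∈ pvCleanedOf rows ↔ (pvKey x ∈ rows.map pvKey ∧ x = pvLastD rows (pvKey x)) := by
  unfold pvCleanedOf
  constructor
  · intro h
    obtain ⟨d, hd, hx⟩ := List.mem_map.mp h
    have hd' : d ∈ rows.map pvKey := by
      rw [PySem.List.mem_dedup] at hd
      exact hd
    have hk : pvKey x = d := by rw [← hx]; exact pvKey_pvLastD rows d hd'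
    subst hk
    exact ⟨hd', hx.symm⟩
  · rintro ⟨hk, hx⟩
    exact List.mem_map.mpr ⟨pvKey x, by rw [PySem.List.mem_dedup]; exact hk, hx.symm⟩

theorem pvCleanedOf_nodup (rows : List (List (String × String))) : (pvCleanedOf rows).Nodup := by
  unfold pvCleanedOf
  refine List.Nodup.map_on ?_ (PySem.List.nodup_dedup _)
  intro d hd d' hd' heq
  rw [PySem.List.mem_dedup] at hd hd'
  have h1 := pvKey_pvLastD rows d hd
  have h2 := pvKey_pvLastD rows d' hd'
  rw [← h1, ← h2, heq]

theorem pvA_fst (rows : List (List (String × String)))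
    (d0 : PySem.Dict String (List (String × String))) (o0 : List String) :
    (rows.foldl (fun acc r =>
        (acc.1.insert (pvKey r) r, if acc.1.contains (pvKey r) then acc.2 else acc.2 ++ [pvKey r]))
      (d0, o0)).1
    = rows.foldl (fun dd r => dd.insert (pvKey r) r) d0 := by
  induction rows generalizing d0 o0 with
  | nil => rfl
  | cons r t ih =>
    simp only [List.foldl_cons]
    exact ih _ _

theorem pvA_keys (rows : List (List (String × String))) :
    (rows.foldl (fun dd r => dd.insert (pvKey r) r) PySem.Dict.empty).keys
      = PySem.List.dedup (rows.map pvKey) := by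
  rw [PySem.Dict.keys_foldl_insert_key, PySem.Dict.keys_empty, PySem.List.dedup_eq_ofList,
    PySem.Set.update_nil_left]

theorem pvA_getD (rows : List (List (String × String))) (d : String) :
    (rows.foldl (fun dd r => dd.insert (pvKey r) r) PySem.Dict.empty).getD d []
      = pvLastD rows d := by
  induction rows using List.reverseRecOn with
  | nil => rfl
  | append_singleton rows r ih =>
    rw [List.foldl_append, List.foldl_cons, List.foldl_nil, PySem.Dict.getD_insert,
      pvLastD_append_singleton, ih]
    rcases eq_or_ne d (pvKey r) with h | h
    · rw [if_pos h, if_pos h.symm]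
    · rw [if_neg h, if_neg (fun hh => h hh.symm)]

theorem pvA_snd (rows : List (List (String × String))) :
    (rows.foldl (fun acc r =>
        (acc.1.insert (pvKey r) r, if acc.1.contains (pvKey r) then acc.2 else acc.2 ++ [pvKey r]))
      (PySem.Dict.empty, ([] : List String))).2
    = PySem.List.dedup (rows.map pvKey) := by
  induction rows using List.reverseRecOn with
  | nil => rfl
  | append_singleton rows r ih =>
    rw [List.foldl_append, List.foldl_cons, List.foldl_nil]
    show (if _ then _ else _) = _
    rw [pvA_fst, ih]
    have hc : (rows.foldl (fun dd r => dd.insert (pvKey r) r) PySem.Dict.empty).contains (pvKey r)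
        = decide (pvKey r ∈ rows.map pvKey) := by
      have hiff : (rows.foldl (fun dd r => dd.insert (pvKey r) r) PySem.Dict.empty).contains (pvKey r) = true
          ↔ pvKey r ∈ rows.map pvKey := by
        rw [PySem.Dict.contains_iff_mem_keys, pvA_keys, PySem.List.mem_dedup]
      cases hcc : (rows.foldl (fun dd r => dd.insert (pvKey r) r) PySem.Dict.empty).contains (pvKey r) with
      | true => simp [hiff.mp hcc]
      | false =>
        have hm : pvKey r ∉ rows.map pvKey := fun hm => by rw [hiff.mpr hm] at hcc; cases hcc
        simp [hm]
    rw [hc, List.map_append, List.map_cons, List.map_nil, PySem.List.dedup_eq_ofList,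
      PySem.List.dedup_eq_ofList, PySem.Set.ofList_append_singleton]
    by_cases hm : pvKey r ∈ rows.map pvKey
    · rw [if_pos (by simpa using hm)]
      show _ = PySem.Set.add _ _
      rw [PySem.Set.add]
      rw [if_pos ?_]
      rw [PySem.Set.contains_iff, PySem.Set.mem_ofList]
      exact hm
    · rw [if_neg (by simpa using hm)]
      show _ = PySem.Set.add _ _
      rw [PySem.Set.add, if_neg ?_]
      rw [PySem.Set.contains_iff, PySem.Set.mem_ofList]
      exact hm

theorem pvA_eq_sorted_cleaned (rows : List (List (String × String))) :
    clean_nav_rows rows = PySem.List.sorted (pvCleanedOf rows) pvKey false := by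
  unfold clean_nav_rows
  simp only [pvA_fst, pvA_snd, pvA_getD]
  rfl

theorem pv_main (rows : List (List (String × String))) :
    clean_nav_rows rows = clean_nav_rows_alt rows := by
  rw [pvA_eq_sorted_cleaned]
  have hB : clean_nav_rows_alt rows = pvRd (PySem.List.sorted rows pvKey false) := by
    unfold clean_nav_rows_alt
    exact pvB_eq_rd _
  rw [hB]
  have hpw := pvRd_pairwise _ (PySem.List.sorted_pairwise rows pvKey)
  have hnd1 : (pvRd (PySem.List.sorted rows pvKey false)).Nodup :=
    hpw.imp (fun h => fun heq => absurd (heq ▸ h) (lt_irrefl _))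
  refine PySem.List.sorted_eq_of_perm_of_pairwise_lt _ _ _ ?_ hpw
  refine (List.perm_ext_iff_of_nodup hnd1 (pvCleanedOf_nodup rows)).mpr ?_
  intro x
  rw [pv_mem_rd_iff x _ (PySem.List.sorted_pairwise rows pvKey), pv_mem_cleanedOf,
    pvLastD_sorted]
  have hmem : pvKey x ∈ (PySem.List.sorted rows pvKey false).map pvKey ↔ pvKey x ∈ rows.map pvKey :=
    ((PySem.List.sorted_perm rows pvKey false).map pvKey).mem_iff
  rw [hmem]

-- ===== VERDICT (by name: the statement is the Claim_ definition above) =====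
theorem clean_nav_rows_spec : Claim_equal_clean_nav_rows := by
  intro rows _ _
  unfold Spec_clean_nav_rows
  exact pv_main rows
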